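-- pv_equiv track=rewrite | github.com/kunal0011/myWorksSpace | python/src/Google/1165calculatetiem.py | calculateTime
-- ===== SOURCE A (Python) =====
-- def calculateTime(keyboard: str, word: str) -> int:
--     position = {char: i for i, char in enumerate(keyboard)}
--     total_time = 0
--     current_position = 0
--
--     for char in word:
--         total_time += abs(position[char] - current_position)
--         current_position = position[char]
--
--     return total_time
-- ===== SOURCE B (Python) =====
-- def calculateTime(keyboard: str, word: str) -> int:
--     # Boundary-crossing sweep: each move from p to q contributes 1 to every key
--     # boundary between min(p,q) and max(p,q). Mark moves in a difference array,
--     # then the total time is the sum of the prefix sums (crossings per boundary).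
--     position = {char: i for i, char in enumerate(keyboard)}
--     diff = [0] * (len(keyboard) + 1)
--     cur = 0
--     for char in word:
--         p = position[char]
--         lo, hi = (cur, p) if cur <= p else (p, cur)
--         diff[lo] += 1
--         diff[hi] -= 1
--         cur = p
--     total = 0
--     crossings = 0
--     for d in diff:
--         crossings += d
--         total += crossings
--     return total
-- ===== Notes on version B (the rewrite author's own statement) =====
-- stated objective: alternative
-- what changed: Replaces summing per-move distances with a boundary-crossing sweep: each move is recorded as +1/-1 in a difference array over keyboard boundaries, and the total time is the sum of the prefix sums (number of crossings per boundary).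
import Mathlib
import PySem

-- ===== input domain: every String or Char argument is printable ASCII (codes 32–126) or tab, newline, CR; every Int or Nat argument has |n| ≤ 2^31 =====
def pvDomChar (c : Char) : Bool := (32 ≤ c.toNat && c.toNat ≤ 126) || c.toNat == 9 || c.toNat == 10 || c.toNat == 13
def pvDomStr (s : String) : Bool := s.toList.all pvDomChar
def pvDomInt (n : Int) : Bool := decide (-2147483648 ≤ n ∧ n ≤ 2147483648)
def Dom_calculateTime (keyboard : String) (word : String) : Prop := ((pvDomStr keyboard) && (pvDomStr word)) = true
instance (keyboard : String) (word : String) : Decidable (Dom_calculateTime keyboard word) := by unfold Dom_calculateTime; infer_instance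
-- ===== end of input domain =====

-- B replaces A's per-move distance accumulation by a boundary-crossing sweep: each move is
-- recorded as +1/-1 in a difference array over keyboard boundaries, and the answer is the
-- sum of the prefix sums; same cost, a different algorithm.

-- ===== PORT A =====
-- position = {char: i for i, char in enumerate(keyboard)}  (dict comprehension = fold of inserts)
def pvPosition (keyboard : String) : PySem.Dict Char Int :=
  (PySem.List.enumerate keyboard.toList 0).foldl
    (fun d p => d.insert p.2 p.1) PySem.Dict.empty

def calculateTime (keyboard : String) (word : String) : Int :=
  let position := pvPosition keyboard
  -- position[char] raises KeyError when char ∉ keyboard; Pre_ excludes that, so getD 0 is exact on Pre_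
  let r := word.toList.foldl
    (fun (st : Int × Int) c =>
      let p := (position.get? c).getD 0
      (st.1 + |p - st.2|, p)) (0, 0)
  r.1

-- ===== PORT B =====
-- body of B's marking loop: p = position[char]; lo,hi = (cur,p) if cur<=p else (p,cur);
-- diff[lo] += 1; diff[hi] -= 1; cur = p   (lo, hi are keyboard positions, provably
-- nonnegative and in range, so Nat indexing via .toNat and getD is exact here)
def pvMark (position : PySem.Dict Char Int) (st : List Int × Int) (c : Char) : List Int × Int :=
  let p := (position.get? c).getD 0   -- position[char]; exact on Pre_ (KeyError excluded)
  let lo := if st.2 ≤ p then st.2 else p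
  let hi := if st.2 ≤ p then p else st.2
  let d1 := st.1.set lo.toNat (st.1.getD lo.toNat 0 + 1)
  let d2 := d1.set hi.toNat (d1.getD hi.toNat 0 - 1)
  (d2, p)

def calculateTime_alt (keyboard : String) (word : String) : Int :=
  let position := pvPosition keyboard
  -- diff = [0] * (len(keyboard) + 1); the marking loop carries (diff, cur)
  let st := word.toList.foldl (pvMark position)
    (List.replicate (keyboard.toList.length + 1) (0 : Int), (0 : Int))
  -- total = 0; crossings = 0; for d in diff: crossings += d; total += crossings
  (st.1.foldl (fun (s : Int × Int) d => (s.1 + (s.2 + d), s.2 + d)) ((0 : Int), (0 : Int))).1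

-- ===== PRECONDITION & SPEC =====
-- Pre_ excludes exactly the inputs where a character of word is absent from keyboard:
-- there both Pythons raise KeyError.
def Pre_calculateTime (keyboard : String) (word : String) : Prop :=
  (word.toList.all (fun c => keyboard.toList.contains c)) = true
instance (keyboard : String) (word : String) : Decidable (Pre_calculateTime keyboard word) := by
  unfold Pre_calculateTime; infer_instance

def pvWitness_calculateTime : String × String := ("ab", "ba")

def Spec_calculateTime (keyboard : String) (word : String) (out : Int) : Prop := out = calculateTime_alt keyboard word
instance (keyboard : String) (word : String) (out : Int) : Decidable (Spec_calculateTime keyboard word out) := by unfold Spec_calculateTime; infer_instance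

-- ===== CLAIM (what is proved, stated in full; the proofs are below) =====
def Claim_equal_calculateTime : Prop := ∀ (keyboard : String) (word : String), Dom_calculateTime keyboard word → Pre_calculateTime keyboard word → Spec_calculateTime keyboard word (calculateTime keyboard word)

-- ===== LEMMAS AND PROOFS =====

-- pss l = sum of the prefix sums of l, exactly B's second loop
def pss (l : List Int) : Int :=
  (l.foldl (fun (s : Int × Int) d => (s.1 + (s.2 + d), s.2 + d)) ((0 : Int), (0 : Int))).1

theorem pss_from (l : List Int) (a c : Int) :
    (l.foldl (fun (s : Int × Int) d => (s.1 + (s.2 + d), s.2 + d)) (a, c)).1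
      = a + c * l.length + pss l := by
  induction l generalizing a c with
  | nil => simp [pss]
  | cons d xs ih =>
    simp only [List.foldl_cons]
    rw [ih]
    have h : pss (d :: xs) = (0 + (0 + d)) + (0 + d) * (xs.length : Int) + pss xs := by
      unfold pss
      simp only [List.foldl_cons]
      exact ih _ _
    rw [h]
    simp only [List.length_cons]
    push_cast
    ring

theorem pss_cons (d : Int) (xs : List Int) :
    pss (d :: xs) = d * (xs.length + 1) + pss xs := by
  rw [show pss (d :: xs)
      = (xs.foldl (fun (s : Int × Int) d => (s.1 + (s.2 + d), s.2 + d)) (0 + (0 + d), 0 + d)).1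
      from rfl, pss_from]
  ring

theorem pss_replicate (n : Nat) : pss (List.replicate n 0) = 0 := by
  induction n with
  | zero => rfl
  | succ k ih => rw [List.replicate_succ, pss_cons, ih]; ring

theorem pss_set (l : List Int) (i : Nat) (v : Int) (h : i < l.length) :
    pss (l.set i (l.getD i 0 + v)) = pss l + v * ((l.length : Int) - i) := by
  induction l generalizing i with
  | nil => simp at h
  | cons x xs ih =>
    cases i with
    | zero =>
      simp only [List.set_cons_zero, List.getD_cons_zero]
      rw [pss_cons, pss_cons]
      simp only [List.length_cons]
      push_cast; ring
    | succ j =>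
      simp only [List.set_cons_succ, List.getD_cons_succ]
      rw [pss_cons, pss_cons, ih j (by simpa using h)]
      simp only [List.length_set, List.length_cons]
      push_cast; ring

-- every value stored by the insert loop is either an original value or a first component of the list
theorem values_foldl_insert {l : List (Int × Char)} {d : PySem.Dict Char Int} {v : Int}
    (h : v ∈ (l.foldl (fun d p => d.insert p.2 p.1) d).values) :
    v ∈ d.values ∨ ∃ p ∈ l, p.1 = v := by
  induction l generalizing d with
  | nil => exact Or.inl h
  | cons q qs ih =>
    rcases ih h with h' | ⟨p, hp, hv⟩
    · rcases PySem.Dict.mem_values_insert d q.2 q.1 v h' with h'' | h''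
      · exact Or.inr ⟨q, List.mem_cons_self, h''.symm⟩
      · exact Or.inl h''
    · exact Or.inr ⟨p, List.mem_cons_of_mem _ hp, hv⟩

-- bound on keyboard positions: 0 ≤ v ≤ length keyboard (with default 0)
theorem pos_bound (keyboard : String) (c : Char) :
    0 ≤ ((pvPosition keyboard).get? c).getD 0 ∧
    ((pvPosition keyboard).get? c).getD 0 ≤ (keyboard.toList.length : Int) := by
  cases hg : (pvPosition keyboard).get? c with
  | none => simp
  | some v =>
    simp only [Option.getD_some]
    have hmem : (c, v) ∈ (pvPosition keyboard).items :=
      PySem.Dict.mem_items_of_get?_eq_some (pvPosition keyboard) hg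
    have hv : v ∈ (pvPosition keyboard).values := by
      simp only [PySem.Dict.values]
      exact List.mem_map.2 ⟨(c, v), hmem, rfl⟩
    rcases values_foldl_insert hv with h | ⟨p, hp, hpv⟩
    · simp [PySem.Dict.values, PySem.Dict.empty] at h
    · rcases (PySem.List.mem_enumerate_iff _ _ _).1 hp with ⟨k, hk, hpk⟩
      subst hpk
      simp only at hpv
      subst hpv
      constructor
      · omega
      · exact_mod_cast by omega

-- A's accumulator is additive in its first component
theorem a_shift (f : Char → Int) (l : List Char) (t cur : Int) :
    (l.foldl (fun (st : Int × Int) c => (st.1 + |f c - st.2|, f c)) (t, cur)).1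
      = t + (l.foldl (fun (st : Int × Int) c => (st.1 + |f c - st.2|, f c)) (0, cur)).1 := by
  induction l generalizing t cur with
  | nil => simp
  | cons c l' ih =>
    simp only [List.foldl_cons]
    rw [ih, ih (0 + |f c - cur|)]
    ring

-- the marking loop raises pss by exactly A's running total
theorem sweep_eq (keyboard : String) (l : List Char) :
    ∀ (diff : List Int) (cur : Int),
      diff.length = keyboard.toList.length + 1 →
      0 ≤ cur → cur ≤ (keyboard.toList.length : Int) →
    pss ((l.foldl (pvMark (pvPosition keyboard)) (diff, cur)).1)
      = pss diff
        + (l.foldl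
            (fun (st : Int × Int) c =>
              (st.1 + |((pvPosition keyboard).get? c).getD 0 - st.2|,
               ((pvPosition keyboard).get? c).getD 0)) (0, cur)).1 := by
  induction l with
  | nil => intro diff cur _ _ _; simp
  | cons c l' ih =>
    intro diff cur hlen hc0 hcL
    obtain ⟨hp0, hpL⟩ := pos_bound keyboard c
    set L := keyboard.toList.length with hL
    set p := ((pvPosition keyboard).get? c).getD 0 with hp
    simp only [List.foldl_cons]
    have hlo0 : (0:Int) ≤ if cur ≤ p then cur else p := by split <;> omega
    have hhi0 : (0:Int) ≤ if cur ≤ p then p else cur := by split <;> omega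
    set lo := if cur ≤ p then cur else p with hlo
    set hi := if cur ≤ p then p else cur with hhi
    have hloL : lo ≤ (L : Int) := by rw [hlo]; split <;> omega
    have hhiL : hi ≤ (L : Int) := by rw [hhi]; split <;> omega
    have hloLt : lo.toNat < diff.length := by rw [hlen]; omega
    set d1 := diff.set lo.toNat (diff.getD lo.toNat 0 + 1) with hd1
    have hd1len : d1.length = L + 1 := by rw [hd1, List.length_set, hlen]
    have hhiLt : hi.toNat < d1.length := by rw [hd1len]; omega
    set d2 := d1.set hi.toNat (d1.getD hi.toNat 0 - 1) with hd2
    have hd2len : d2.length = L + 1 := by rw [hd2, List.length_set, hd1len]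
    have hmark : pvMark (pvPosition keyboard) (diff, cur) c = (d2, p) := by
      simp only [pvMark, hd2, hd1, hhi, hlo, hp]
    rw [hmark, ih d2 p hd2len hp0 hpL]
    have e2 : pss d2 = pss d1 + (-1) * ((d1.length : Int) - hi.toNat) := by
      rw [hd2]
      have := pss_set d1 hi.toNat (-1) hhiLt
      simpa using this
    have e1 : pss d1 = pss diff + 1 * ((diff.length : Int) - lo.toNat) := by
      rw [hd1]
      have := pss_set diff lo.toNat 1 hloLt
      simpa using this
    rw [e2, e1, hd1len, hlen,
      a_shift (fun c => ((pvPosition keyboard).get? c).getD 0) l' (0 + |p - cur|) p]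
    have habs : |p - cur| = hi - lo := by
      rw [hhi, hlo]; rcases le_or_gt cur p with h | h
      · rw [if_pos h, if_pos h, abs_of_nonneg (by omega)]
      · rw [if_neg (by omega), if_neg (by omega), abs_of_neg (by omega)]; ring
    have hloNat : ((lo.toNat : Int)) = lo := Int.toNat_of_nonneg hlo0
    have hhiNat : ((hi.toNat : Int)) = hi := Int.toNat_of_nonneg hhi0
    rw [habs]
    push_cast [hloNat, hhiNat]
    ring

-- ===== VERDICT (by name: the statement is the Claim_ definition above) =====
theorem calculateTime_spec : Claim_equal_calculateTime := by
  intro keyboard word _ _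
  have h := sweep_eq keyboard word.toList
    (List.replicate (keyboard.toList.length + 1) 0) 0
    (by simp) le_rfl (by exact_mod_cast Nat.zero_le _)
  rw [pss_replicate] at h
  have ha : calculateTime keyboard word
      = (word.toList.foldl
          (fun (st : Int × Int) c =>
            (st.1 + |((pvPosition keyboard).get? c).getD 0 - st.2|,
             ((pvPosition keyboard).get? c).getD 0)) (0, 0)).1 := rfl
  have hb : calculateTime_alt keyboard word
      = pss ((word.toList.foldl (pvMark (pvPosition keyboard))
          (List.replicate (keyboard.toList.length + 1) 0, 0)).1) := rfl
  show calculateTime keyboard word = calculateTime_alt keyboard word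
  rw [ha, hb, h]
  ring
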